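-- pv_equiv track=rewrite | github.com/Quantanalyst/SoftwareEngineeringNotes | Data Structure and Algorithms/Popular Questions/Codility/OddOccuranceInArray.py | solution
-- ===== SOURCE A (Python) =====
-- def solution(A):
--     if len(A) == 1:
--          return A[0]
--     A = sorted(A)     #---- O(n*log n)
--     for i in range(0 , len (A) , 2): #---- O(n)
--          if i+1 == len(A):
--              return A[i]
--          if A[i] != A[i+1]:
--              return A[i]
-- ===== SOURCE B (Python) =====
-- def solution(A):
--     counts = {}
--     for x in A:
--         counts[x] = counts.get(x, 0) + 1
--     parity = 0
--     for v in sorted(counts):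
--         parity = (parity + counts[v]) % 2
--         if parity == 1:
--             return v
-- ===== Notes on version B (the rewrite author's own statement) =====
-- stated objective: alternative
-- what changed: Replaces the full sort plus even-index pair scan with a one-pass hash count followed by a cumulative-parity scan over the sorted distinct values (O(n + k log k) for k distinct values vs O(n log n)).
-- outside the precondition, e.g. on solution([1, 1]): A returns None, B returns None; on solution([]): A returns None, B returns None
import Mathlib
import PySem

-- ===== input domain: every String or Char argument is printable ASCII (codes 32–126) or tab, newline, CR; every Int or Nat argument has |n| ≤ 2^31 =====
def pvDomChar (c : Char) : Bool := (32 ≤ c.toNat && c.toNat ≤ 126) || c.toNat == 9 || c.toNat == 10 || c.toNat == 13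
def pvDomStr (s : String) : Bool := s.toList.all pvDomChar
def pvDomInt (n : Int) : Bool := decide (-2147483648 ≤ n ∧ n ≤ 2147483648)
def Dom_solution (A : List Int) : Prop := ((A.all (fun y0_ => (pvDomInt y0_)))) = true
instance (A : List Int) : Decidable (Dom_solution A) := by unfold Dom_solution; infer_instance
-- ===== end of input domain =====

-- B replaces A's full sort + even-index pair scan by a hash count and a cumulative-parity
-- scan over the sorted distinct values (objective: alternative algorithm of similar cost).

-- ===== PORT A =====
-- the 'for i in range(0, len(A), 2)' loop with its two early returns, as index recursion
def aScan (s : List Int) (i : Nat) : Option Int :=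
  if h : i < s.length then
    if (i : Int) + 1 = (s.length : Int) then some (PySem.List.pyGetD s (i : Int) 0)
    else if PySem.List.pyGetD s (i : Int) 0 ≠ PySem.List.pyGetD s ((i : Int) + 1) 0 then
      some (PySem.List.pyGetD s (i : Int) 0)
    else aScan s (i + 2)
  else none
termination_by s.length - i

-- Python returns None when the loop falls through; Pre_solution excludes those inputs,
-- the port returns 0 there (.getD 0).
def solution (A : List Int) : Int :=
  if (A.length : Int) = 1 then PySem.List.pyGetD A 0 0
  else (aScan (PySem.List.sorted A (fun x => x) false) 0).getD 0

-- ===== PORT B =====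
def altLoop (counts : PySem.Dict Int Int) (parity : Int) : List Int → Option Int
  | [] => none
  | v :: vs =>
    let p := PySem.Int.mod (parity + counts.getD v 0) 2
    if p = 1 then some v else altLoop counts p vs

def solution_alt (A : List Int) : Int :=
  let counts := A.foldl (fun d x => d.insert x (d.getD x 0 + 1)) PySem.Dict.empty
  (altLoop counts 0 (PySem.List.sorted counts.keys (fun v => v) false)).getD 0

-- ===== PRECONDITION & SPEC =====
-- Pre_ excludes exactly the lists in which every value occurs an even number of times
-- (including []): there Python A falls through its loop and returns None, which is not an
-- int (Python B returns None on exactly the same lists).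
def Pre_solution (A : List Int) : Prop := ∃ v ∈ A, A.count v % 2 = 1
instance (A : List Int) : Decidable (Pre_solution A) := by unfold Pre_solution; infer_instance

def pvWitness_solution : List Int := [3, 1, 3]

def Spec_solution (A : List Int) (out : Int) : Prop := out = solution_alt A
instance (A : List Int) (out : Int) : Decidable (Spec_solution A out) := by unfold Spec_solution; infer_instance

-- ===== CLAIM (what is proved, stated in full; the proofs are below) =====
def Claim_equal_solution : Prop := ∀ (A : List Int), Dom_solution A → Pre_solution A → Spec_solution A (solution A)

-- ===== LEMMAS AND PROOFS =====

-- A's pair scan on the sorted list, as structural recursion consuming two elements at a time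
def gScan : List Int → Option Int
  | [] => none
  | [x] => some x
  | x :: y :: t => if x ≠ y then some x else gScan t

-- the common semantic core: first value (in the given order) at which the cumulative
-- count-parity is odd; c is the multiplicity function, b the parity carried so far
def eScan (c : Int → Nat) (b : Bool) : List Int → Option Int
  | [] => none
  | v :: vs =>
    let b' := b ^^ decide (c v % 2 = 1)
    if b' then some v else eScan c b' vs

theorem aScan_eq_gScan (s : List Int) (i : Nat) : aScan s i = gScan (s.drop i) := by
  rw [aScan]
  by_cases h : i < s.length
  · have hd : s.drop i = s[i] :: s.drop (i + 1) := List.drop_eq_getElem_cons h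
    simp only [dif_pos h]
    by_cases h1 : i + 1 = s.length
    · have hnil : s.drop (i + 1) = [] := by simp [h1]
      have hI : ((i : Int) + 1 = (s.length : Int)) := by omega
      have e1 : PySem.List.pyGetD s (i : Int) 0 = s[i] := by
        rw [PySem.List.pyGetD_natCast]
        simp [List.getD_eq_getElem?_getD, List.getElem?_eq_getElem h]
      rw [hd, hnil, if_pos hI, e1]
      rfl
    · have h2 : i + 1 < s.length := by omega
      have hd2 : s.drop (i + 1) = s[i + 1] :: s.drop (i + 2) := List.drop_eq_getElem_cons h2
      have hne : ¬ ((i : Int) + 1 = (s.length : Int)) := by exact_mod_cast h1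
      have e1 : PySem.List.pyGetD s (i : Int) 0 = s[i] := by
        rw [PySem.List.pyGetD_natCast]
        simp [List.getD_eq_getElem?_getD, List.getElem?_eq_getElem h]
      have e2 : PySem.List.pyGetD s ((i : Int) + 1) 0 = s[i + 1] := by
        rw [show ((i : Int) + 1) = ((i + 1 : Nat) : Int) by push_cast; ring]
        rw [PySem.List.pyGetD_natCast]
        simp [List.getD_eq_getElem?_getD, List.getElem?_eq_getElem h2]
      rw [hd, hd2, if_neg hne, e1, e2]
      by_cases hx : s[i] = s[i + 1]
      · simp only [gScan, hx, ne_eq, not_true_eq_false, if_neg, if_false]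
        simpa using aScan_eq_gScan s (i + 2)
      · simp [gScan, hx]
  · have hnil : s.drop i = [] := List.drop_eq_nil_of_le (by omega)
    rw [dif_neg h, hnil]
    rfl
termination_by s.length - i

theorem eScan_congr (c c' : Int → Nat) (l : List Int)
    (h : ∀ v ∈ l, c v % 2 = c' v % 2) : ∀ b, eScan c b l = eScan c' b l := by
  induction l with
  | nil => intro b; rfl
  | cons v vs ih =>
    intro b
    have hv := h v (by simp)
    simp only [eScan, hv]
    split
    · rfl
    · exact ih (fun w hw => h w (by simp [hw])) _

theorem gScan_sorted (s : List Int) (hs : s.Pairwise (· ≤ ·)) :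
    gScan s = eScan (fun v => s.count v) false s.dedup := by
  match s with
  | [] => rfl
  | [x] => simp [gScan, eScan]
  | x :: y :: t =>
    by_cases hxy : x = y
    · subst hxy
      have ht : t.Pairwise (· ≤ ·) := (List.pairwise_cons.mp (List.pairwise_cons.mp hs).2).2
      have ih := gScan_sorted t ht
      have hg : gScan (x :: x :: t) = gScan t := by simp [gScan]
      have hcnt : ∀ v, (x :: x :: t).count v = t.count v + (if v = x then 2 else 0) := by
        intro v
        rcases eq_or_ne v x with rfl | hv
        · simp [List.count_cons]
        · simp [List.count_cons, hv, Ne.symm hv]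
      by_cases hxt : x ∈ t
      · have hdd : (x :: x :: t).dedup = t.dedup :=
          by rw [List.dedup_cons_of_mem (by simp), List.dedup_cons_of_mem hxt]
        rw [hg, hdd, ih]
        refine (eScan_congr _ _ _ ?_ false).symm
        intro v _
        rw [hcnt v]; split <;> omega
      · have hdd : (x :: x :: t).dedup = x :: t.dedup := by
          rw [List.dedup_cons_of_mem (by simp), List.dedup_cons_of_notMem hxt]
        have hcx : (x :: x :: t).count x = 2 := by
          rw [hcnt x]; simp [List.count_eq_zero.mpr hxt]
        rw [hg, hdd, ih]
        simp only [eScan, hcx]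
        norm_num
        refine (eScan_congr _ _ _ ?_ false).symm
        intro v hv
        have hvt : v ∈ t := List.mem_dedup.mp hv
        have hvx : v ≠ x := fun e => hxt (e ▸ hvt)
        rw [hcnt v, if_neg hvx]
        omega
    · -- x ≠ y : sorted, so x is strictly below everything after it
      obtain ⟨hx, hyt⟩ := List.pairwise_cons.mp hs
      have hxlt : ∀ z ∈ y :: t, x ≠ z := by
        intro z hz
        rcases List.mem_cons.mp hz with rfl | hzt
        · exact hxy
        · have : y ≤ z := (List.pairwise_cons.mp hyt).1 z hzt
          have : x < z := lt_of_lt_of_le (lt_of_le_of_ne (hx y (by simp)) hxy) this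
          omega
      have hnm : x ∉ y :: t := fun hm => hxlt x hm rfl
      have hdd : (x :: y :: t).dedup = x :: (y :: t).dedup := List.dedup_cons_of_notMem hnm
      have hcx : (x :: y :: t).count x = 1 := by
        simp [List.count_cons, List.count_eq_zero.mpr hnm]
      rw [hdd]
      simp [gScan, eScan, hxy, hcx]

theorem altLoop_counter (A : List Int) (vs : List Int) :
    ∀ b : Bool, altLoop (PySem.Dict.counter A) (if b then 1 else 0) vs
      = eScan (fun v => A.count v) b vs := by
  induction vs with
  | nil => intro b; rfl
  | cons v vs ih =>
    intro b
    simp only [altLoop, eScan, PySem.Dict.getD_counter]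
    have hmod : PySem.Int.mod ((if b then 1 else 0) + (A.count v : Int)) 2
        = if (b ^^ decide (A.count v % 2 = 1)) then 1 else 0 := by
      rw [PySem.Int.mod_eq_emod_of_pos (by norm_num)]
      rcases Nat.mod_two_eq_zero_or_one (A.count v) with hc | hc <;>
        cases b <;> simp [hc] <;> omega
    rw [hmod]
    cases hb' : (b ^^ decide (A.count v % 2 = 1)) <;> simp [hb']
    simpa using ih false

theorem sortedKeys_eq_dedup_sorted (A : List Int) :
    PySem.List.sorted (PySem.Dict.counter A).keys (fun v => v) false
      = (PySem.List.sorted A (fun x => x) false).dedup := by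
  rw [PySem.Dict.keys_counter]
  apply PySem.List.sorted_eq_of_perm_of_pairwise_lt
  · -- same distinct elements, both without duplicates
    refine (List.perm_ext_iff_of_nodup (List.nodup_dedup _) (PySem.Set.nodup_ofList A)).mpr ?_
    intro v
    rw [List.mem_dedup, PySem.List.mem_sorted, PySem.Set.mem_ofList]
  · have h1 : ((PySem.List.sorted A (fun x => x) false).dedup).Pairwise (· ≤ ·) :=
      (PySem.List.sorted_pairwise A (fun x => x)).sublist (List.dedup_sublist _)
    exact (h1.and (List.nodup_dedup _)).imp (fun h => lt_of_le_of_ne h.1 h.2)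

theorem solution_alt_eq (A : List Int) :
    solution_alt A
      = (eScan (fun v => A.count v) false ((PySem.List.sorted A (fun x => x) false).dedup)).getD 0 := by
  simp only [solution_alt]
  rw [PySem.Dict.foldl_insert_getD_add_one_eq_counter, sortedKeys_eq_dedup_sorted]
  rw [show (0 : Int) = (if false then 1 else 0 : Int) from rfl, altLoop_counter]

theorem solution_eq (A : List Int) :
    solution A
      = (eScan (fun v => A.count v) false ((PySem.List.sorted A (fun x => x) false).dedup)).getD 0 := by
  unfold solution
  have hsort := PySem.List.sorted_pairwise A (fun x => x)
  have hcnt : ∀ v ∈ (PySem.List.sorted A (fun x => x) false).dedup,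
      (PySem.List.sorted A (fun x => x) false).count v % 2 = A.count v % 2 := by
    intro v _
    rw [(PySem.List.sorted_perm A (fun x => x) false).count_eq]
  by_cases h1 : (A.length : Int) = 1
  · obtain ⟨a, rfl⟩ : ∃ a, A = [a] := by
      match A with
      | [a] => exact ⟨a, rfl⟩
      | [] => simp at h1
      | a :: b :: t => exfalso; simp at h1; omega
    have hs : PySem.List.sorted [a] (fun x : Int => x) false = [a] :=
      PySem.List.sorted_eq_self_of_pairwise _ _ (by simp)
    rw [if_pos h1, hs]
    simp [eScan, PySem.List.pyGetD_zero_cons]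
  · rw [if_neg h1]
    rw [show aScan (PySem.List.sorted A (fun x => x) false) 0
          = gScan (PySem.List.sorted A (fun x => x) false) from aScan_eq_gScan _ 0]
    rw [gScan_sorted _ hsort, eScan_congr _ _ _ hcnt false]

-- ===== VERDICT (by name: the statement is the Claim_ definition above) =====
theorem solution_spec : Claim_equal_solution := by
  unfold Claim_equal_solution Spec_solution
  intro A _ _
  rw [solution_eq, solution_alt_eq]
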